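-- pv_equiv track=rewrite | github.com/nqchung/mpgroup.jsvn | backend/app/views.py | _split_pair_formula
-- ===== SOURCE A (Python) =====
-- def _str_or_none(v):
--     if v is None:
--         return None
--     text = str(v).strip()
--     return text if text else None
--
-- def _split_pair_formula(expr: str | None):
--     text = _str_or_none(expr)
--     if text is None:
--         return None
--     # New format: left x right (x/X/× as separator at top level).
--     # Keep backward compatibility for legacy formulas that used "*".
--     depth = 0
--     for i, ch in enumerate(text):
--         if ch == "(":
--             depth += 1
--         elif ch == ")":
--             depth -= 1
--             if depth < 0:
--                 return None
--         elif ch in {"x", "X", "×"} and depth == 0: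
--             left = text[:i].strip()
--             right = text[i + 1 :].strip()
--             if not left or not right:
--                 return None
--             return left, right
--     depth = 0
--     for i, ch in enumerate(text):
--         if ch == "(":
--             depth += 1
--         elif ch == ")":
--             depth -= 1
--             if depth < 0:
--                 return None
--         elif ch == "*" and depth == 0:
--             left = text[:i].strip()
--             right = text[i + 1 :].strip()
--             if not left or not right:
--                 return None
--             return left, right
--     return None
-- ===== SOURCE B (Python) =====
-- def _split_pair_formula(expr):
--     if expr is None:
--         return None
--     text = str(expr).strip()
--     if not text:
--         return None
--     depth = 0
--     star = -1  # index of the first top-level '*', set once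
--     for i, ch in enumerate(text):
--         if ch == "(":
--             depth += 1
--         elif ch == ")":
--             depth -= 1
--             if depth < 0:
--                 return None
--         elif depth == 0:
--             if ch in ("x", "X", "×"):
--                 left = text[:i].strip()
--                 right = text[i + 1 :].strip()
--                 return (left, right) if left and right else None
--             if ch == "*" and star < 0:
--                 star = i
--     if star < 0:
--         return None
--     left = text[:star].strip()
--     right = text[star + 1 :].strip()
--     return (left, right) if left and right else None
-- ===== Notes on version B (the rewrite author's own statement) =====
-- stated objective: simpler
-- what changed: A scans the whole string twice (one pass for the letter separators, then a fresh pass from index 0 for the legacy star separator); B does a single pass that splits at a top-level letter separator immediately and records only the index of the first top-level star, splitting there after the loop.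
import Mathlib
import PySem

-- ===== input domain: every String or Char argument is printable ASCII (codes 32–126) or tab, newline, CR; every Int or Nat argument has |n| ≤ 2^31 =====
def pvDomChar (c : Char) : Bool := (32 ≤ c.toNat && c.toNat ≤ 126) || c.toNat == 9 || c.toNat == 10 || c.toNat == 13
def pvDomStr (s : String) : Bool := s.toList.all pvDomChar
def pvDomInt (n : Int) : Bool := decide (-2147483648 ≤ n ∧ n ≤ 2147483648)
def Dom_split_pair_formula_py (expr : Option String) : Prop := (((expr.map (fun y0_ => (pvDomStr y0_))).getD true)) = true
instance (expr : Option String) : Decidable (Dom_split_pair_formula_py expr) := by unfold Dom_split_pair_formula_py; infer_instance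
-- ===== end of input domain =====

-- B replaces A's two sequential scans (x/X/× scan, then a fresh scan for '*') by one scan that
-- records the first top-level '*' index; objective: simpler (single pass).

-- splitting text at separator index i: text[:i].strip(), text[i+1:].strip(); the slice with the
-- nonnegative in-range index i is exactly take/drop (shared by both Pythons verbatim)
def pvSplitAt (full : List Char) (i : Nat) : Option (String × String) :=
  let left := PySem.Chars.strip (full.take i)
  let right := PySem.Chars.strip (full.drop (i + 1))
  if left = [] ∨ right = [] then none else some (String.mk left, String.mk right)

-- ===== PORT A =====
-- _str_or_none: str(v).strip(), empty → None (str(v) of a str is itself)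
def pvStrOrNone (v : Option String) : Option (List Char) :=
  match v with
  | none => none
  | some s =>
    let text := PySem.Chars.strip s.toList
    if text = [] then none else some text

-- first for-loop of A: looks for top-level x/X/×; `some r` = early return r, `none` = fall through
def pvLoopA1 (full rest : List Char) (i : Nat) (depth : Int) :
    Option (Option (String × String)) :=
  match rest with
  | [] => none
  | c :: cs =>
    if c = '(' then pvLoopA1 full cs (i + 1) (depth + 1)
    else if c = ')' then
      if depth - 1 < 0 then some none else pvLoopA1 full cs (i + 1) (depth - 1)
    else if (c = 'x' ∨ c = 'X' ∨ c = '×') ∧ depth = 0 then some (pvSplitAt full i)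
    else pvLoopA1 full cs (i + 1) depth

-- second for-loop of A: rescans from the start for a top-level '*'
def pvLoopA2 (full rest : List Char) (i : Nat) (depth : Int) : Option (String × String) :=
  match rest with
  | [] => none
  | c :: cs =>
    if c = '(' then pvLoopA2 full cs (i + 1) (depth + 1)
    else if c = ')' then
      if depth - 1 < 0 then none else pvLoopA2 full cs (i + 1) (depth - 1)
    else if c = '*' ∧ depth = 0 then pvSplitAt full i
    else pvLoopA2 full cs (i + 1) depth

def split_pair_formula_py (expr : Option String) : Option (String × String) :=
  match pvStrOrNone expr with
  | none => none
  | some text =>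
    match pvLoopA1 text text 0 0 with
    | some r => r
    | none => pvLoopA2 text text 0 0

-- ===== PORT B =====
-- single loop: split at a top-level x immediately; remember the first top-level '*' (star),
-- used after the loop ends ('star = -1' is Option.none here)
def pvLoopB (full rest : List Char) (i : Nat) (depth : Int) (star : Option Nat) :
    Option (String × String) :=
  match rest with
  | [] => match star with
          | some s => pvSplitAt full s
          | none => none
  | c :: cs =>
    if c = '(' then pvLoopB full cs (i + 1) (depth + 1) star
    else if c = ')' then
      if depth - 1 < 0 then none else pvLoopB full cs (i + 1) (depth - 1) star
    else if (c = 'x' ∨ c = 'X' ∨ c = '×') ∧ depth = 0 then pvSplitAt full i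
    else if c = '*' ∧ depth = 0 ∧ star = none then pvLoopB full cs (i + 1) depth (some i)
    else pvLoopB full cs (i + 1) depth star

def split_pair_formula_py_alt (expr : Option String) : Option (String × String) :=
  match expr with
  | none => none
  | some s =>
    let text := PySem.Chars.strip s.toList
    if text = [] then none else pvLoopB text text 0 0 none

-- ===== PRECONDITION & SPEC =====
def Spec_split_pair_formula_py (expr : Option String) (out : Option (String × String)) : Prop := out = split_pair_formula_py_alt expr
instance (expr : Option String) (out : Option (String × String)) : Decidable (Spec_split_pair_formula_py expr out) := by unfold Spec_split_pair_formula_py; infer_instance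

-- ===== CLAIM (what is proved, stated in full; the proofs are below) =====
def Claim_equal_split_pair_formula_py : Prop := ∀ (expr : Option String), Dom_split_pair_formula_py expr → Spec_split_pair_formula_py expr (split_pair_formula_py expr)

-- ===== LEMMAS AND PROOFS =====

-- once a star is recorded, B behaves like A's first loop with the star split as fallback
theorem pvLoopB_some_star (full : List Char) (s : Nat) :
    ∀ (rest : List Char) (i : Nat) (depth : Int),
      pvLoopB full rest i depth (some s) = (pvLoopA1 full rest i depth).getD (pvSplitAt full s) := by
  intro rest
  induction rest with
  | nil => intro i depth; simp [pvLoopB, pvLoopA1]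
  | cons c cs ih =>
    intro i depth
    simp only [pvLoopB, pvLoopA1]
    split_ifs with h1 h2 h3 h4 h5 <;>
      simp_all [ih]

-- with no star recorded yet, B equals A's first loop with A's second loop (continued at the
-- same position/depth) as fallback
theorem pvLoopB_none_star (full : List Char) :
    ∀ (rest : List Char) (i : Nat) (depth : Int),
      pvLoopB full rest i depth none = (pvLoopA1 full rest i depth).getD (pvLoopA2 full rest i depth) := by
  intro rest
  induction rest with
  | nil => intro i depth; simp [pvLoopB, pvLoopA1, pvLoopA2]
  | cons c cs ih =>
    intro i depth
    simp only [pvLoopB, pvLoopA1, pvLoopA2]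
    split_ifs with h1 h2 h3 h4 h5 h6 h7 h8 h9 h10 h11 h12 <;>
      simp_all [ih, pvLoopB_some_star]

-- ===== VERDICT (by name: the statement is the Claim_ definition above) =====
theorem split_pair_formula_py_spec : Claim_equal_split_pair_formula_py := by
  intro expr _
  unfold Spec_split_pair_formula_py split_pair_formula_py split_pair_formula_py_alt pvStrOrNone
  match expr with
  | none => rfl
  | some s =>
    by_cases h : PySem.Chars.strip s.toList = []
    · simp [h]
    · simp only [if_neg h]
      rw [pvLoopB_none_star]
      cases pvLoopA1 (PySem.Chars.strip s.toList) (PySem.Chars.strip s.toList) 0 0 <;> simp
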